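-- pv_equiv track=rewrite | github.com/hankcs/HanLP | plugins/hanlp_common/hanlp_common/util.py | infer_space_after
-- ===== SOURCE A (Python) =====
-- from typing import Union, Any, List, Optional, Tuple, Iterable, Dict
--
-- def infer_space_after(sent: List[str]):
--     last_token = None
--     quote_count: int = 0
--     # infer whitespace after field
--     whitespace_after = [True] * len(sent)
--     for token in range(len(sent)):
--         if sent[token] == '"':
--             quote_count += 1
--             if quote_count % 2 != 0:
--                 whitespace_after[token] = False
--             elif last_token is not None:
--                 whitespace_after[last_token] = False
--
--         if last_token is not None:
--
--             if sent[token] in [".", ":", ",", ";", ")", "n't", "!", "?"]: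
--                 whitespace_after[last_token] = False
--
--             if sent[token].startswith("'"):
--                 whitespace_after[last_token] = False
--
--         if sent[token] in ["("]:
--             whitespace_after[token] = False
--
--         last_token = token
--     return whitespace_after
-- ===== SOURCE B (Python) =====
-- def infer_space_after(sent):
--     n = len(sent)
--     # cumulative count of '"' tokens: cum[i] = number of '"' among sent[:i+1]
--     cum = []
--     c = 0
--     for t in sent:
--         if t == '"':
--             c += 1
--         cum.append(c)
--
--     def no_space(i):
--         t = sent[i]
--         if t == '(':
--             return True
--         if t == '"' and cum[i] % 2 == 1:
--             return True
--         if i + 1 < n: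
--             nxt = sent[i + 1]
--             if nxt in (".", ":", ",", ";", ")", "n't", "!", "?") or nxt.startswith("'"):
--                 return True
--             if nxt == '"' and cum[i + 1] % 2 == 0:
--                 return True
--         return False
--
--     return [not no_space(i) for i in range(n)]
-- ===== Notes on version B (the rewrite author's own statement) =====
-- stated objective: alternative
-- what changed: Replaces A's stateful 'current token clears the previous token's flag' accumulator loop with a precomputed cumulative quote count plus a single comprehension where each flag is decided locally from token i and a look-ahead at token i+1.
import Mathlib
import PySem

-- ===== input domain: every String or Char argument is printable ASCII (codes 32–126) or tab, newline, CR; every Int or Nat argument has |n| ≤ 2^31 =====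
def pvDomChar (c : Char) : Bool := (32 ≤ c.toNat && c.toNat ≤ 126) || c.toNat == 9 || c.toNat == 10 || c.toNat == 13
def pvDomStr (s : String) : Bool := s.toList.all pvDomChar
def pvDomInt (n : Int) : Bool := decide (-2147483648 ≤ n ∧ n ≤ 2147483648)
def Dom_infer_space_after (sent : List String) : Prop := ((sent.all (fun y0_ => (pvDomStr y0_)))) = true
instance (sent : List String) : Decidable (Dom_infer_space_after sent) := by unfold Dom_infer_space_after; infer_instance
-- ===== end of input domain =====

-- B rewrites A's accumulator loop (current token clears the previous flag) as a
-- cumulative quote count plus a per-index look-ahead comprehension; same cost, alternative decomposition.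

-- ===== PORT A =====
-- one iteration of A's loop; state = (whitespace_after, quote_count, last_token)
def aStep (sent : List String) (st : List Bool × Int × Option Nat) (token : Nat) :
    List Bool × Int × Option Nat :=
  let wa := st.1
  let qc := st.2.1
  let lt := st.2.2
  let t := sent.getD token ""   -- sent[token]; token < len(sent) always holds here
  let p :=
    if t == "\"" then
      let qc' := qc + 1
      if qc' % 2 != 0 then (wa.set token false, qc')
      else
        match lt with
        | some l => (wa.set l false, qc')
        | none => (wa, qc')
    else (wa, qc)
  let wa1 := p.1
  let qc1 := p.2
  let wa2 :=
    match lt with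
    | some l =>
      let w := if t ∈ [".", ":", ",", ";", ")", "n't", "!", "?"] then wa1.set l false else wa1
      if PySem.Str.startswith t "'" then w.set l false else w
    | none => wa1
  let wa3 := if t ∈ ["("] then wa2.set token false else wa2
  (wa3, qc1, some token)

def infer_space_after (sent : List String) : List Bool :=
  ((List.range sent.length).foldl (aStep sent)
    (List.replicate sent.length true, (0 : Int), (none : Option Nat))).1

-- ===== PORT B =====
-- cum[i] = number of '"' tokens among sent[:i+1], built in one pass
def cumQuotes (sent : List String) : List Nat :=
  (sent.foldl
    (fun (acc : List Nat × Nat) t =>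
      let c := if t == "\"" then acc.2 + 1 else acc.2
      (acc.1 ++ [c], c))
    ([], 0)).1

def noSpace (sent : List String) (cum : List Nat) (i : Nat) : Bool :=
  let t := sent.getD i ""
  if t == "(" then true
  else if t == "\"" && cum.getD i 0 % 2 == 1 then true
  else if i + 1 < sent.length then
    let nxt := sent.getD (i + 1) ""
    if nxt ∈ [".", ":", ",", ";", ")", "n't", "!", "?"] || PySem.Str.startswith nxt "'" then true
    else if nxt == "\"" && cum.getD (i + 1) 0 % 2 == 0 then true
    else false
  else false

def infer_space_after_alt (sent : List String) : List Bool :=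
  let cum := cumQuotes sent
  (List.range sent.length).map (fun i => !(noSpace sent cum i))

-- ===== PRECONDITION & SPEC =====
def Spec_infer_space_after (sent : List String) (out : List Bool) : Prop := out = infer_space_after_alt sent
instance (sent : List String) (out : List Bool) : Decidable (Spec_infer_space_after sent out) := by unfold Spec_infer_space_after; infer_instance

-- ===== CLAIM (what is proved, stated in full; the proofs are below) =====
def Claim_equal_infer_space_after : Prop := ∀ (sent : List String), Dom_infer_space_after sent → Spec_infer_space_after sent (infer_space_after sent)

-- ===== LEMMAS AND PROOFS =====

-- number of '"' tokens in a list
def qcount (l : List String) : Nat := l.countP (fun t => t == "\"")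

-- the flag token i gives itself (before any look-ahead clearing)
def selfFlag (sent : List String) (i : Nat) : Bool :=
  !((sent.getD i "" == "(") ||
    (sent.getD i "" == "\"" && qcount (sent.take (i + 1)) % 2 == 1))

-- token j clears its predecessor's flag
def succClear (sent : List String) (j : Nat) : Bool :=
  decide (sent.getD j "" ∈ [".", ":", ",", ";", ")", "n't", "!", "?"]) ||
  PySem.Str.startswith (sent.getD j "") "'" ||
  (sent.getD j "" == "\"" && qcount (sent.take (j + 1)) % 2 == 0)

-- the whitespace_after array after A has processed tokens [0, k)
def gfun (sent : List String) (k i : Nat) : Bool :=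
  if i + 1 < k then selfFlag sent i && !succClear sent (i + 1)
  else if i < k then selfFlag sent i
  else true

lemma set_map_range (g : Nat → Bool) (j n : Nat) (hj : j < n) :
    ((List.range n).map g).set j false =
      (List.range n).map (fun i => if i = j then false else g i) := by
  apply List.ext_getElem
  · simp
  · intro i h1 h2
    simp only [List.getElem_set, List.getElem_map, List.getElem_range]
    split
    · rename_i h; rw [← h]; simp
    · rename_i h; rw [if_neg (fun hh => h hh.symm)]

lemma set_if_map_range (g : Nat → Bool) (c : Prop) [Decidable c] (j n : Nat) (hj : j < n) :
    (if c then ((List.range n).map g).set j false else (List.range n).map g) =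
      (List.range n).map (fun i => if c ∧ i = j then false else g i) := by
  split_ifs with hc
  · rw [set_map_range g j n hj]
    apply List.map_congr_left
    intro i _
    by_cases h : i = j <;> simp [h, hc]
  · apply List.map_congr_left
    intro i _
    simp [hc]

lemma qcount_take_succ (sent : List String) (k : Nat) (hk : k < sent.length) :
    qcount (sent.take (k + 1)) =
      qcount (sent.take k) + (if sent.getD k "" == "\"" then 1 else 0) := by
  have h : sent.take (k + 1) = sent.take k ++ [sent[k]] := List.take_succ_eq_append_getElem hk
  have hg : sent.getD k "" = sent[k] := by
    rw [List.getD_eq_getElem?_getD, List.getElem?_eq_getElem hk, Option.getD_some]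
  rw [hg]
  unfold qcount
  rw [h, List.countP_append]
  simp [List.countP_cons]

lemma cum_foldl (l : List String) : ∀ (acc : List Nat) (c : Nat),
    (l.foldl
      (fun (acc : List Nat × Nat) t =>
        let c := if t == "\"" then acc.2 + 1 else acc.2
        (acc.1 ++ [c], c))
      (acc, c)) =
      (acc ++ (List.range l.length).map (fun i => c + qcount (l.take (i + 1))),
        c + qcount l) := by
  induction l with
  | nil => intro acc c; simp [qcount]
  | cons t l ih =>
    intro acc c
    simp only [List.foldl_cons]
    rw [ih]
    have hc : qcount (t :: l) = (if t == "\"" then 1 else 0) + qcount l := by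
      simp [qcount, List.countP_cons]; split <;> simp_all <;> omega
    refine Prod.ext ?_ ?_
    swap
    · simp only [hc]; split <;> omega
    simp only
    rw [List.length_cons, List.range_succ_eq_map]
    simp only [List.map_cons, List.map_map, List.append_assoc]
    congr 1
    apply List.ext_getElem
    · simp
    · intro i h1 h2
      simp only [List.length_cons] at *
      rcases i with _ | i
      · simp [qcount, List.countP_cons]
        split <;> simp_all
      · have h3 : i < l.length := by simpa using h1
        simp only [List.getElem_cons_succ, List.getElem_map, List.getElem_range,
          Function.comp]
        have h4 : (t :: l).take (i + 1 + 1) = t :: l.take (i + 1) := rfl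
        rw [h4]
        simp [qcount, List.countP_cons]
        split <;> simp_all <;> omega

lemma cumQuotes_eq (sent : List String) :
    cumQuotes sent = (List.range sent.length).map (fun i => qcount (sent.take (i + 1))) := by
  unfold cumQuotes
  rw [cum_foldl]
  simp

-- evaluation lemmas for gfun / selfFlag / succClear

lemma gfun_ge (sent : List String) (k i : Nat) (h : k ≤ i) : gfun sent k i = true := by
  unfold gfun
  rw [if_neg (by omega), if_neg (by omega)]

lemma gfun_self (sent : List String) (k : Nat) : gfun sent (k + 1) k = selfFlag sent k := by
  unfold gfun
  rw [if_neg (by omega), if_pos (by omega)]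

lemma gfun_lt (sent : List String) (k i : Nat) (h : i + 1 < k) :
    gfun sent k i = (selfFlag sent i && !succClear sent (i + 1)) := by
  unfold gfun
  rw [if_pos h]

lemma gfun_other (sent : List String) (k i : Nat) (h1 : i + 1 ≠ k) (h2 : i ≠ k) :
    gfun sent (k + 1) i = gfun sent k i := by
  unfold gfun
  split_ifs <;> first | rfl | omega

lemma sf_quote_odd (sent : List String) (i : Nat) (h : sent.getD i "" = "\"")
    (ho : qcount (sent.take (i + 1)) % 2 = 1) : selfFlag sent i = false := by
  unfold selfFlag
  rw [h]
  simp [ho]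

lemma sf_quote_even (sent : List String) (i : Nat) (h : sent.getD i "" = "\"")
    (he : qcount (sent.take (i + 1)) % 2 = 0) : selfFlag sent i = true := by
  unfold selfFlag
  rw [h]
  simp [he]

lemma sf_nonquote (sent : List String) (i : Nat) (h : (sent.getD i "" == "\"") = false) :
    selfFlag sent i = !(sent.getD i "" == "(") := by
  have h' : ¬ sent[i]?.getD "" = "\"" := by simpa using h
  unfold selfFlag
  simp [h']

lemma sc_quote_odd (sent : List String) (j : Nat) (h : sent.getD j "" = "\"")
    (ho : qcount (sent.take (j + 1)) % 2 = 1) : succClear sent j = false := by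
  unfold succClear
  rw [h]
  simp [ho]
  decide

lemma sc_quote_even (sent : List String) (j : Nat) (h : sent.getD j "" = "\"")
    (he : qcount (sent.take (j + 1)) % 2 = 0) : succClear sent j = true := by
  unfold succClear
  rw [h]
  simp [he]

lemma sc_nonquote (sent : List String) (j : Nat) (h : (sent.getD j "" == "\"") = false) :
    succClear sent j =
      (decide (sent.getD j "" ∈ [".", ":", ",", ";", ")", "n't", "!", "?"]) ||
        PySem.Str.startswith (sent.getD j "") "'") := by
  have h' : ¬ sent[j]?.getD "" = "\"" := by simpa using h
  unfold succClear
  simp [h']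

-- one step of A's loop advances the invariant array: first token
lemma aStep_eq_zero (sent : List String) (hk : 0 < sent.length) :
    aStep sent ((List.range sent.length).map (gfun sent 0),
      ((qcount (sent.take 0) : Int)), none) 0 =
    ((List.range sent.length).map (gfun sent 1),
      ((qcount (sent.take 1) : Int)), some 0) := by
  have hq := qcount_take_succ sent 0 hk
  by_cases hquote : (sent.getD 0 "" == "\"") = true
  · have ht : sent.getD 0 "" = "\"" := eq_of_beq hquote
    have hq2 : qcount (sent.take 1) = qcount (sent.take 0) + 1 := by
      rw [hq, if_pos hquote]
    have hparen : ¬ (sent.getD 0 "" ∈ (["("] : List String)) := by rw [ht]; decide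
    by_cases hodd : qcount (sent.take 1) % 2 = 1
    · have hbne : ((((qcount (sent.take 0) : Int)) + 1) % 2 != 0) = true := by
        simp only [bne_iff_ne, ne_eq]
        omega
      simp only [aStep, if_pos hquote, hbne, reduceIte, if_neg hparen]
      refine Prod.ext ?_ (Prod.ext (by push_cast [hq2]; ring) rfl)
      simp only
      rw [set_map_range _ _ _ hk]
      apply List.map_congr_left
      intro i hi
      simp only [List.mem_range] at hi
      by_cases hik : i = 0
      · subst hik
        rw [if_pos rfl, gfun_self, sf_quote_odd sent 0 ht hodd]
      · rw [if_neg hik, gfun_other sent 0 i (by omega) hik]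
    · have hev : ((((qcount (sent.take 0) : Int)) + 1) % 2) = 0 := by omega
      have hbne : ((((qcount (sent.take 0) : Int)) + 1) % 2 != 0) = false := by
        rw [hev]
        decide
      simp only [aStep, if_pos hquote, hbne, Bool.false_eq_true, reduceIte, if_neg hparen]
      refine Prod.ext ?_ (Prod.ext (by push_cast [hq2]; ring) rfl)
      simp only
      apply List.map_congr_left
      intro i hi
      simp only [List.mem_range] at hi
      by_cases hik : i = 0
      · subst hik
        rw [gfun_ge sent 0 0 le_rfl, gfun_self, sf_quote_even sent 0 ht (by show qcount (sent.take 1) % 2 = 0; omega)]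
      · rw [gfun_other sent 0 i (by omega) hik]
  · have hquote' : (sent.getD 0 "" == "\"") = false := by
      simpa using hquote
    simp only [aStep, hquote', Bool.false_eq_true, reduceIte]
    refine Prod.ext ?_ (Prod.ext (by rw [hq, if_neg hquote]; push_cast; ring) rfl)
    simp only
    rw [set_if_map_range (gfun sent 0) _ 0 sent.length hk]
    apply List.map_congr_left
    intro i hi
    simp only [List.mem_range] at hi
    by_cases hik : i = 0
    · subst hik
      rw [gfun_self, sf_nonquote sent 0 hquote']
      by_cases hparen : sent.getD 0 "" ∈ (["("] : List String)
      · rw [if_pos ⟨hparen, rfl⟩]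
        have h2 : sent.getD 0 "" = "(" := by simpa using hparen
        simp only [List.getD_eq_getElem?_getD] at h2
        simp [h2]
      · rw [if_neg (fun hc => hparen hc.1), gfun_ge sent 0 0 le_rfl]
        have h2 : ¬ sent.getD 0 "" = "(" := by simpa using hparen
        simp only [List.getD_eq_getElem?_getD] at h2
        simp [h2]
    · rw [if_neg (by simp [hik]), gfun_other sent 0 i (by omega) hik]

-- one step of A's loop advances the invariant array: later tokens
lemma aStep_eq_succ (sent : List String) (k' : Nat) (hk : k' + 1 < sent.length) :
    aStep sent ((List.range sent.length).map (gfun sent (k' + 1)),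
      ((qcount (sent.take (k' + 1)) : Int)), some k') (k' + 1) =
    ((List.range sent.length).map (gfun sent (k' + 2)),
      ((qcount (sent.take (k' + 2)) : Int)), some (k' + 1)) := by
  have hq := qcount_take_succ sent (k' + 1) hk
  by_cases hquote : (sent.getD (k' + 1) "" == "\"") = true
  · have ht : sent.getD (k' + 1) "" = "\"" := eq_of_beq hquote
    have hq2 : qcount (sent.take (k' + 2)) = qcount (sent.take (k' + 1)) + 1 := by
      rw [show k' + 1 + 1 = k' + 2 from rfl] at hq
      rw [hq, if_pos hquote]
    have hmem : ¬ (sent.getD (k' + 1) "" ∈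
        ([".", ":", ",", ";", ")", "n't", "!", "?"] : List String)) := by
      rw [ht]; decide
    have hparen : ¬ (sent.getD (k' + 1) "" ∈ (["("] : List String)) := by rw [ht]; decide
    have hsw : PySem.Str.startswith (sent.getD (k' + 1) "") "'" = false := by
      rw [ht]; decide
    by_cases hodd : qcount (sent.take (k' + 2)) % 2 = 1
    · have hbne : ((((qcount (sent.take (k' + 1)) : Int)) + 1) % 2 != 0) = true := by
        simp only [bne_iff_ne, ne_eq]
        omega
      simp only [aStep, if_pos hquote, hbne, reduceIte, if_neg hmem, if_neg hparen, hsw,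
        Bool.false_eq_true]
      refine Prod.ext ?_ (Prod.ext (by push_cast [hq2]; ring) rfl)
      simp only
      rw [set_map_range _ _ _ hk]
      apply List.map_congr_left
      intro i hi
      simp only [List.mem_range] at hi
      by_cases hik : i = k' + 1
      · simp only [hik]
        rw [if_pos trivial, show k' + 2 = (k' + 1) + 1 from rfl, gfun_self,
          sf_quote_odd sent (k' + 1) ht (by show qcount (sent.take (k' + 2)) % 2 = 1; omega)]
      · rw [if_neg hik]
        by_cases hik' : i = k'
        · simp only [hik']
          rw [show k' + 1 = k' + 1 from rfl, gfun_self, gfun_lt sent (k' + 2) k' (by omega),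
            sc_quote_odd sent (k' + 1) ht (by show qcount (sent.take (k' + 2)) % 2 = 1; omega)]
          simp
        · rw [show k' + 2 = (k' + 1) + 1 from rfl, gfun_other sent (k' + 1) i (by omega) hik]
    · have hev : ((((qcount (sent.take (k' + 1)) : Int)) + 1) % 2) = 0 := by omega
      have hbne : ((((qcount (sent.take (k' + 1)) : Int)) + 1) % 2 != 0) = false := by
        rw [hev]
        decide
      simp only [aStep, if_pos hquote, hbne, Bool.false_eq_true, reduceIte, if_neg hmem,
        if_neg hparen, hsw]
      refine Prod.ext ?_ (Prod.ext (by push_cast [hq2]; ring) rfl)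
      simp only
      rw [set_map_range _ _ _ (by omega : k' < sent.length)]
      apply List.map_congr_left
      intro i hi
      simp only [List.mem_range] at hi
      by_cases hik' : i = k'
      · simp only [hik']
        rw [if_pos trivial, gfun_lt sent (k' + 2) k' (by omega),
          sc_quote_even sent (k' + 1) ht (by show qcount (sent.take (k' + 2)) % 2 = 0; omega)]
        simp
      · rw [if_neg hik']
        by_cases hik : i = k' + 1
        · simp only [hik]
          rw [gfun_ge sent (k' + 1) (k' + 1) le_rfl, show k' + 2 = (k' + 1) + 1 from rfl, gfun_self,
            sf_quote_even sent (k' + 1) ht (by show qcount (sent.take (k' + 2)) % 2 = 0; omega)]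
        · rw [show k' + 2 = (k' + 1) + 1 from rfl, gfun_other sent (k' + 1) i (by omega) hik]
  · have hquote' : (sent.getD (k' + 1) "" == "\"") = false := by
      simpa using hquote
    simp only [aStep, hquote', Bool.false_eq_true, reduceIte]
    refine Prod.ext ?_ (Prod.ext ?_ rfl)
    swap
    · rw [show k' + 1 + 1 = k' + 2 from rfl] at hq
      rw [hq, if_neg hquote]
      push_cast
      ring
    simp only
    rw [set_if_map_range (gfun sent (k' + 1)) _ k' sent.length (by omega)]
    rw [set_if_map_range _ _ k' sent.length (by omega)]
    rw [set_if_map_range _ _ (k' + 1) sent.length hk]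
    apply List.map_congr_left
    intro i hi
    simp only [List.mem_range] at hi
    by_cases hik' : i = k'
    · simp only [hik']
      rw [if_neg (fun h => (by omega : ¬ (k' = k' + 1)) h.2)]
      rw [gfun_lt sent (k' + 2) k' (by omega), sc_nonquote sent (k' + 1) hquote', gfun_self]
      by_cases hsw : PySem.Str.startswith (sent.getD (k' + 1) "") "'" = true
      · rw [if_pos ⟨hsw, trivial⟩]
        simp_all
      · rw [if_neg (fun h => hsw h.1)]
        by_cases hmem : sent.getD (k' + 1) "" ∈
            ([".", ":", ",", ";", ")", "n't", "!", "?"] : List String)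
        · rw [if_pos ⟨hmem, trivial⟩]
          simp_all
        · rw [if_neg (fun h => hmem h.1)]
          simp_all
    · by_cases hik : i = k' + 1
      · simp only [hik]
        by_cases hparen : sent.getD (k' + 1) "" ∈ (["("] : List String)
        · rw [if_pos ⟨hparen, trivial⟩, show k' + 2 = (k' + 1) + 1 from rfl, gfun_self,
            sf_nonquote sent (k' + 1) hquote']
          have h2 : sent.getD (k' + 1) "" = "(" := by simpa using hparen
          simp only [List.getD_eq_getElem?_getD] at h2
          simp [h2]
        · rw [if_neg (fun h => hparen h.1),
            if_neg (fun h => (by omega : ¬ (k' + 1 = k')) h.2),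
            if_neg (fun h => (by omega : ¬ (k' + 1 = k')) h.2),
            gfun_ge sent (k' + 1) (k' + 1) le_rfl,
            show k' + 2 = (k' + 1) + 1 from rfl, gfun_self, sf_nonquote sent (k' + 1) hquote']
          have h2 : ¬ sent.getD (k' + 1) "" = "(" := by simpa using hparen
          simp only [List.getD_eq_getElem?_getD] at h2
          simp [h2]
      · rw [if_neg (fun h => hik h.2), if_neg (fun h => hik' h.2), if_neg (fun h => hik' h.2),
          show k' + 2 = (k' + 1) + 1 from rfl, gfun_other sent (k' + 1) i (by omega) hik]

-- the loop invariant: after processing tokens [0, k)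
lemma foldA (sent : List String) : ∀ (k : Nat), k ≤ sent.length →
    (List.range k).foldl (aStep sent)
      (List.replicate sent.length true, (0 : Int), (none : Option Nat)) =
      ((List.range sent.length).map (gfun sent k),
        ((qcount (sent.take k) : Int)),
        if k = 0 then none else some (k - 1)) := by
  intro k
  induction k with
  | zero =>
    intro _
    simp only [List.range_zero, List.foldl_nil, List.take_zero, reduceIte]
    refine Prod.ext ?_ (Prod.ext (by simp [qcount]) rfl)
    simp only
    apply List.ext_getElem
    · simp
    · intro i h1 h2
      simp only [List.getElem_replicate, List.getElem_map, List.getElem_range]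
      rw [gfun_ge sent 0 i (by omega)]
  | succ k ih =>
    intro hk
    rw [List.range_succ, List.foldl_append, ih (by omega), List.foldl_cons, List.foldl_nil]
    cases k with
    | zero =>
      simp only [reduceIte]
      rw [aStep_eq_zero sent (by omega)]
      simp
    | succ k' =>
      simp only [if_neg (Nat.succ_ne_zero k'), Nat.succ_sub_one]
      rw [show k' + 1 + 1 = k' + 2 from rfl, aStep_eq_succ sent k' (by omega)]
      simp

-- pointwise agreement of the invariant's final value with B's local rule
lemma pointwise_eq (sent : List String) (i : Nat) (hi : i < sent.length) :
    gfun sent sent.length i =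
      !(noSpace sent
        ((List.range sent.length).map (fun m => qcount (sent.take (m + 1)))) i) := by
  have hcum : ∀ j, j < sent.length →
      ((List.range sent.length).map (fun m => qcount (sent.take (m + 1)))).getD j 0 =
        qcount (sent.take (j + 1)) := by
    intro j hj
    rw [List.getD_eq_getElem?_getD, List.getElem?_eq_getElem (by simpa using hj)]
    simp
  unfold noSpace
  rw [hcum i hi]
  by_cases h1 : i + 1 < sent.length
  · rw [hcum (i + 1) h1, gfun_lt sent sent.length i h1]
    unfold selfFlag succClear
    simp only [if_pos h1]
    by_cases b1 : sent.getD i "" = "(" <;>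
      by_cases b2 : sent.getD i "" = "\"" <;>
        by_cases b3 : qcount (sent.take (i + 1)) % 2 = 1 <;>
          by_cases b4 : sent.getD (i + 1) "" ∈
              ([".", ":", ",", ";", ")", "n't", "!", "?"] : List String) <;>
            by_cases b5 : PySem.Str.startswith (sent.getD (i + 1) "") "'" = true <;>
              by_cases b6 : sent.getD (i + 1) "" = "\"" <;>
                by_cases b7 : qcount (sent.take (i + 1 + 1)) % 2 = 0 <;>
                  simp_all
  · have h2 : i + 1 = sent.length := by omega
    rw [show sent.length = i + 1 from h2.symm, gfun_self]
    unfold selfFlag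
    rw [if_neg (by omega : ¬ i + 1 < i + 1)]
    by_cases b1 : sent.getD i "" = "(" <;>
      by_cases b2 : sent.getD i "" = "\"" <;>
        by_cases b3 : qcount (sent.take (i + 1)) % 2 = 1 <;>
          simp_all

theorem infer_space_after_spec : Claim_equal_infer_space_after := by
  intro sent _
  unfold Spec_infer_space_after infer_space_after infer_space_after_alt
  rw [foldA sent sent.length le_rfl, cumQuotes_eq]
  simp only
  apply List.map_congr_left
  intro i hi
  simp only [List.mem_range] at hi
  rw [pointwise_eq sent i hi]
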